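-- pv_equiv track=rewrite | github.com/phng3001/alliancecan | script/interactive_genome_plot_v2/genome_plot.py | attr_hover_text
-- ===== SOURCE A (Python) =====
-- def attr_hover_text(attr_dict, file_format="GFF3"):
--     hover_lines = []
--     feature_id = attr_dict.get("locus_tag") or attr_dict.get("ID") or attr_dict.get("id")
--     if feature_id:
--         hover_lines.append(f"Feature: {feature_id}")
--     gene_name = attr_dict.get("gene") or attr_dict.get("Name") or attr_dict.get("Gene") or attr_dict.get("name")
--     if gene_name:
--         hover_lines.append(f"Gene: {gene_name}")
--     product = attr_dict.get("product") or attr_dict.get("description") or attr_dict.get("note")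
--     if product:
--         hover_lines.append(f"Description: {product}")
--     if not hover_lines:
--         if file_format.upper() == "GFF3":
--             kv_pairs = [f"{k}={v}" for k,v in attr_dict.items()]
--             if kv_pairs: hover_lines.append("; ".join(kv_pairs))
--         elif file_format.upper() == "GTF":
--             kv_pairs = [f'{k}="{v}"' for k,v in attr_dict.items()]
--             if kv_pairs: hover_lines.append("; ".join(kv_pairs))
--     return "<br>".join(hover_lines)
-- ===== SOURCE B (Python) =====
-- # Single pass over the items with a key->(category, rank) index; per category keep the
-- # truthy value of lowest rank, instead of per-category chains of dict lookups.
-- _RANK = {"locus_tag": (0, 0), "ID": (0, 1), "id": (0, 2),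
--          "gene": (1, 0), "Name": (1, 1), "Gene": (1, 2), "name": (1, 3),
--          "product": (2, 0), "description": (2, 1), "note": (2, 2)}
-- _LABELS = ("Feature: ", "Gene: ", "Description: ")
--
-- def attr_hover_text(attr_dict, file_format="GFF3"):
--     best = [None, None, None]          # per category: (rank, value) of best truthy candidate
--     for k, v in attr_dict.items():
--         cr = _RANK.get(k)
--         if cr and v:
--             cat, rank = cr
--             if best[cat] is None or rank < best[cat][0]:
--                 best[cat] = (rank, v)
--     lines = [lab + b[1] for lab, b in zip(_LABELS, best) if b]
--     if not lines and attr_dict: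
--         up = file_format.upper()
--         if up == "GFF3":
--             lines = ["; ".join(f"{k}={v}" for k, v in attr_dict.items())]
--         elif up == "GTF":
--             lines = ["; ".join(f'{k}="{v}"' for k, v in attr_dict.items())]
--     return "<br>".join(lines)
-- ===== Notes on version B (the rewrite author's own statement) =====
-- stated objective: alternative
-- what changed: A chains priority-ordered dict lookups per category; B makes one pass over the items with a key->(category, rank) index, keeping the lowest-rank truthy value per category; Pre_ excludes association lists with duplicate keys, which represent no Python dict input.
import Mathlib
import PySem

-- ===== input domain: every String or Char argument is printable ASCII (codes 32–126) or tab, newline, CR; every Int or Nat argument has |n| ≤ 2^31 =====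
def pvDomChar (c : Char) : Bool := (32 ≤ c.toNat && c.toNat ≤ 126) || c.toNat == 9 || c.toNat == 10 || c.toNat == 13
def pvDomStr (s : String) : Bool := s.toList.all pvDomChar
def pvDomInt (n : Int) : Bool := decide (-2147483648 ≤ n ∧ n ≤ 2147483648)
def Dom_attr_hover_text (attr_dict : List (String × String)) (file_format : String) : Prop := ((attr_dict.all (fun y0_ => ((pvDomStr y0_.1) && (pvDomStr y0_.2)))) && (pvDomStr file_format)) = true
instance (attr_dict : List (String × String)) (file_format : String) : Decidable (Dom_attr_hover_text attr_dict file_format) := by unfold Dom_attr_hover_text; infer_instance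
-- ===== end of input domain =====

-- B replaces A's per-category chains of priority-ordered dict lookups by ONE pass over the
-- items with a key→(category, rank) index, keeping the lowest-rank truthy candidate per
-- category (objective: 'alternative', same cost).

-- dict.get(k): first-match lookup in the insertion-ordered association list (shared primitive of both ports)
def pvGetAttr (d : List (String × String)) (k : String) : Option String :=
  match d with
  | [] => none
  | (k', v) :: rest => if k' = k then some v else pvGetAttr rest k

-- ===== PORT A =====
-- Python 'x or y' on Option String operands (None / possibly-empty str)
def pvPyOr (a b : Option String) : Option String :=
  match a with
  | some s => if s = "" then b else some s
  | none => b

def attr_hover_text (attr_dict : List (String × String)) (file_format : String) : String :=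
  let hover_lines : List String := []
  let feature_id := pvPyOr (pvPyOr (pvGetAttr attr_dict "locus_tag") (pvGetAttr attr_dict "ID")) (pvGetAttr attr_dict "id")
  let hover_lines := match feature_id with
    | some s => if s = "" then hover_lines else hover_lines ++ ["Feature: " ++ s]
    | none => hover_lines
  let gene_name := pvPyOr (pvPyOr (pvPyOr (pvGetAttr attr_dict "gene") (pvGetAttr attr_dict "Name")) (pvGetAttr attr_dict "Gene")) (pvGetAttr attr_dict "name")
  let hover_lines := match gene_name with
    | some s => if s = "" then hover_lines else hover_lines ++ ["Gene: " ++ s]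
    | none => hover_lines
  let product := pvPyOr (pvPyOr (pvGetAttr attr_dict "product") (pvGetAttr attr_dict "description")) (pvGetAttr attr_dict "note")
  let hover_lines := match product with
    | some s => if s = "" then hover_lines else hover_lines ++ ["Description: " ++ s]
    | none => hover_lines
  let hover_lines :=
    if hover_lines = [] then
      if PySem.Str.upper file_format = "GFF3" then
        let kv_pairs := attr_dict.map (fun kv => kv.1 ++ "=" ++ kv.2)
        if kv_pairs = [] then hover_lines else hover_lines ++ [PySem.Str.join "; " kv_pairs]
      else if PySem.Str.upper file_format = "GTF" then
        let kv_pairs := attr_dict.map (fun kv => kv.1 ++ "=\"" ++ kv.2 ++ "\"")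
        if kv_pairs = [] then hover_lines else hover_lines ++ [PySem.Str.join "; " kv_pairs]
      else hover_lines
    else hover_lines
  PySem.Str.join "<br>" hover_lines

-- ===== PORT B =====
-- _RANK.get(k): the key→(category, rank) index of Source B
def pvRankOf (k : String) : Option (Nat × Nat) :=
  if k = "locus_tag" then some (0, 0) else if k = "ID" then some (0, 1) else if k = "id" then some (0, 2)
  else if k = "gene" then some (1, 0) else if k = "Name" then some (1, 1) else if k = "Gene" then some (1, 2) else if k = "name" then some (1, 3)
  else if k = "product" then some (2, 0) else if k = "description" then some (2, 1) else if k = "note" then some (2, 2)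
  else none

-- 'if best[cat] is None or rank < best[cat][0]: best[cat] = (rank, v)'
def pvUpd (cur : Option (Nat × String)) (r : Nat) (v : String) : Option (Nat × String) :=
  match cur with
  | none => some (r, v)
  | some (r0, v0) => if r < r0 then some (r, v) else some (r0, v0)

-- one iteration of Source B's single loop over the items (state = best[0], best[1], best[2])
def pvStep (b : Option (Nat × String) × Option (Nat × String) × Option (Nat × String))
    (kv : String × String) : Option (Nat × String) × Option (Nat × String) × Option (Nat × String) :=
  match pvRankOf kv.1 with
  | none => b
  | some (cat, rank) =>
    if kv.2 = "" then b
    else if cat = 0 then (pvUpd b.1 rank kv.2, b.2.1, b.2.2)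
    else if cat = 1 then (b.1, pvUpd b.2.1 rank kv.2, b.2.2)
    else (b.1, b.2.1, pvUpd b.2.2 rank kv.2)

-- '[lab + b[1] for lab, b in zip(_LABELS, best) if b]', one zip cell
def pvOptLine (lab : String) (b : Option (Nat × String)) : List String :=
  match b with
  | some (_, v) => [lab ++ v]
  | none => []

def attr_hover_text_alt (attr_dict : List (String × String)) (file_format : String) : String :=
  let best := attr_dict.foldl pvStep (none, none, none)
  let lines := pvOptLine "Feature: " best.1 ++ pvOptLine "Gene: " best.2.1 ++ pvOptLine "Description: " best.2.2
  let lines :=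
    if lines = [] ∧ attr_dict ≠ [] then
      let up := PySem.Str.upper file_format
      if up = "GFF3" then [PySem.Str.join "; " (attr_dict.map (fun kv => kv.1 ++ "=" ++ kv.2))]
      else if up = "GTF" then [PySem.Str.join "; " (attr_dict.map (fun kv => kv.1 ++ "=\"" ++ kv.2 ++ "\""))]
      else lines
    else lines
  PySem.Str.join "<br>" lines

-- ===== PRECONDITION & SPEC =====
-- Pre_ excludes association lists with duplicate keys: they represent no Python dict input
-- (dict keys are unique), and on them the list-level behaviours of the two ports are both accidental.
def Pre_attr_hover_text (attr_dict : List (String × String)) (file_format : String) : Prop :=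
  (attr_dict.map Prod.fst).Nodup
instance (attr_dict : List (String × String)) (file_format : String) : Decidable (Pre_attr_hover_text attr_dict file_format) := by unfold Pre_attr_hover_text; infer_instance

def pvWitness_attr_hover_text : (List (String × String)) × String := ([("locus_tag", "tag1"), ("note", "cool")], "GFF3")

def Spec_attr_hover_text (attr_dict : List (String × String)) (file_format : String) (out : String) : Prop := out = attr_hover_text_alt attr_dict file_format
instance (attr_dict : List (String × String)) (file_format : String) (out : String) : Decidable (Spec_attr_hover_text attr_dict file_format out) := by unfold Spec_attr_hover_text; infer_instance

-- ===== CLAIM (what is proved, stated in full; the proofs are below) =====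
def Claim_equal_attr_hover_text : Prop := ∀ (attr_dict : List (String × String)) (file_format : String), Dom_attr_hover_text attr_dict file_format → Pre_attr_hover_text attr_dict file_format → Spec_attr_hover_text attr_dict file_format (attr_hover_text attr_dict file_format)

-- ===== LEMMAS AND PROOFS =====

-- Python truthiness filter on an Optional[str]
def pvT (o : Option String) : Option String :=
  match o with
  | some s => if s = "" then none else some s
  | none => none

theorem pvT_pyOr (a b : Option String) : pvT (pvPyOr a b) = (pvT a).or (pvT b) := by
  cases a with
  | none => rfl
  | some s => by_cases h : s = "" <;> simp [pvPyOr, pvT, h, Option.or]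

-- rank-minimum (left-biased) on optional (rank, value) candidates
def omin (a b : Option (Nat × String)) : Option (Nat × String) :=
  match a, b with
  | none, b => b
  | some x, none => some x
  | some x, some y => if y.1 < x.1 then some y else some x

theorem omin_none_right (a : Option (Nat × String)) : omin a none = a := by cases a <;> rfl

theorem omin_assoc (a b c : Option (Nat × String)) : omin (omin a b) c = omin a (omin b c) := by
  rcases a with _ | ⟨ra, va⟩
  · rfl
  rcases b with _ | ⟨rb, vb⟩
  · rfl
  rcases c with _ | ⟨rc, vc⟩
  · simp [omin_none_right]
  by_cases h1 : rb < ra <;> by_cases h2 : rc < rb <;> by_cases h3 : rc < ra <;>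
    simp [omin, h1, h2, h3] <;> omega

-- the truthy candidate of key slot i
def sl (i : Nat) (o : Option String) : Option (Nat × String) := (pvT o).map (fun v => (i, v))

theorem omin_some_left_comm (i : Nat) (x : String) (j : Nat) (o : Option String)
    (c : Option (Nat × String)) (h : i ≠ j) :
    omin (some (i, x)) (omin (sl j o) c) = omin (sl j o) (omin (some (i, x)) c) := by
  rcases ho : pvT o with _ | w
  · simp [sl, ho, omin]
  · rcases c with _ | ⟨rc, vc⟩ <;> simp only [sl, ho, Option.map_some]
    · by_cases h1 : j < i <;> simp [omin, h1] <;> omega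
    · by_cases h1 : j < i <;> by_cases h2 : rc < j <;> by_cases h3 : rc < i <;>
        simp [omin, h1, h2, h3] <;> omega

theorem pvUpd_eq_omin (b : Option (Nat × String)) (r : Nat) (v : String) :
    pvUpd b r v = omin b (some (r, v)) := by
  rcases b with _ | ⟨r0, v0⟩ <;> rfl

theorem pvGetAttr_not_mem (l : List (String × String)) (k : String)
    (h : k ∉ l.map Prod.fst) : pvGetAttr l k = none := by
  induction l with
  | nil => rfl
  | cons kv rest ih =>
    obtain ⟨k', v⟩ := kv
    simp only [List.map_cons, List.mem_cons, not_or] at h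
    simp only [pvGetAttr]
    rw [if_neg (fun hh => h.1 hh.symm)]
    exact ih h.2


theorem omin_some_sl_comm (i : Nat) (x : String) (j : Nat) (o : Option String) (h : i ≠ j) :
    omin (some (i, x)) (sl j o) = omin (sl j o) (some (i, x)) := by
  have := omin_some_left_comm i x j o none h
  simpa [omin_none_right] using this

theorem sl_none (i : Nat) : sl i none = none := rfl

theorem omin_none_left (b : Option (Nat × String)) : omin none b = b := rfl

-- the three per-category rank-minimum chains
def C0 (l : List (String × String)) : Option (Nat × String) :=
  omin (sl 0 (pvGetAttr l "locus_tag")) (omin (sl 1 (pvGetAttr l "ID")) (sl 2 (pvGetAttr l "id")))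
def C1 (l : List (String × String)) : Option (Nat × String) :=
  omin (sl 0 (pvGetAttr l "gene")) (omin (sl 1 (pvGetAttr l "Name")) (omin (sl 2 (pvGetAttr l "Gene")) (sl 3 (pvGetAttr l "name"))))
def C2 (l : List (String × String)) : Option (Nat × String) :=
  omin (sl 0 (pvGetAttr l "product")) (omin (sl 1 (pvGetAttr l "description")) (sl 2 (pvGetAttr l "note")))

theorem foldl_pvStep_eq (l : List (String × String)) (b0 b1 b2 : Option (Nat × String))
    (h : (l.map Prod.fst).Nodup) :
    l.foldl pvStep (b0, b1, b2) = (omin b0 (C0 l), omin b1 (C1 l), omin b2 (C2 l)) := by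
  induction l generalizing b0 b1 b2 with
  | nil => simp [C0, C1, C2, pvGetAttr, sl, pvT, omin_none_right]
  | cons kv rest ih =>
    obtain ⟨k, v⟩ := kv
    simp only [List.map_cons, List.nodup_cons] at h
    obtain ⟨hk, hrest⟩ := h
    by_cases hkey0 : k = "locus_tag"
    · subst hkey0
      have hn : pvGetAttr rest "locus_tag" = none := pvGetAttr_not_mem rest "locus_tag" hk
      by_cases hv : v = ""
      · have hstep : pvStep (b0, b1, b2) ("locus_tag", v) = (b0, b1, b2) := by
          simp [pvStep, pvRankOf, hv]
        rw [List.foldl_cons, hstep, ih _ _ _ hrest]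
        have e0 : C0 (("locus_tag", v)::rest) = C0 rest := by
          simp [C0, pvGetAttr, hn, sl, pvT, hv]
        have e1 : C1 (("locus_tag", v)::rest) = C1 rest := by
          simp [C1, pvGetAttr]
        have e2 : C2 (("locus_tag", v)::rest) = C2 rest := by
          simp [C2, pvGetAttr]
        rw [e0, e1, e2]
      · have hstep : pvStep (b0, b1, b2) ("locus_tag", v) = (pvUpd b0 0 v, b1, b2) := by
          simp [pvStep, pvRankOf, hv]
        rw [List.foldl_cons, hstep, ih _ _ _ hrest]
        have hsl : sl 0 (some v) = some ((0 : Nat), v) := by simp [sl, pvT, hv]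
        have ec : omin (pvUpd b0 0 v) (C0 rest) = omin b0 (C0 (("locus_tag", v)::rest)) := by
          rw [pvUpd_eq_omin, omin_assoc]
          congr 1
          simp [C0, pvGetAttr, hn, hsl, sl_none, omin_none_left]
        have e1 : C1 (("locus_tag", v)::rest) = C1 rest := by
          simp [C1, pvGetAttr]
        have e2 : C2 (("locus_tag", v)::rest) = C2 rest := by
          simp [C2, pvGetAttr]
        rw [ec, e1, e2]
    by_cases hkey1 : k = "ID"
    · subst hkey1
      have hn : pvGetAttr rest "ID" = none := pvGetAttr_not_mem rest "ID" hk
      by_cases hv : v = ""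
      · have hstep : pvStep (b0, b1, b2) ("ID", v) = (b0, b1, b2) := by
          simp [pvStep, pvRankOf, hv]
        rw [List.foldl_cons, hstep, ih _ _ _ hrest]
        have e0 : C0 (("ID", v)::rest) = C0 rest := by
          simp [C0, pvGetAttr, hn, sl, pvT, hv]
        have e1 : C1 (("ID", v)::rest) = C1 rest := by
          simp [C1, pvGetAttr]
        have e2 : C2 (("ID", v)::rest) = C2 rest := by
          simp [C2, pvGetAttr]
        rw [e0, e1, e2]
      · have hstep : pvStep (b0, b1, b2) ("ID", v) = (pvUpd b0 1 v, b1, b2) := by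
          simp [pvStep, pvRankOf, hv]
        rw [List.foldl_cons, hstep, ih _ _ _ hrest]
        have hsl : sl 1 (some v) = some ((1 : Nat), v) := by simp [sl, pvT, hv]
        have ec : omin (pvUpd b0 1 v) (C0 rest) = omin b0 (C0 (("ID", v)::rest)) := by
          rw [pvUpd_eq_omin, omin_assoc]
          congr 1
          simp only [C0, pvGetAttr, hn, hsl, sl_none, omin_none_left, omin_none_right, String.reduceEq, reduceIte]
          rw [omin_some_left_comm 1 v 0 (pvGetAttr rest "locus_tag") _ (by decide)]
        have e1 : C1 (("ID", v)::rest) = C1 rest := by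
          simp [C1, pvGetAttr]
        have e2 : C2 (("ID", v)::rest) = C2 rest := by
          simp [C2, pvGetAttr]
        rw [ec, e1, e2]
    by_cases hkey2 : k = "id"
    · subst hkey2
      have hn : pvGetAttr rest "id" = none := pvGetAttr_not_mem rest "id" hk
      by_cases hv : v = ""
      · have hstep : pvStep (b0, b1, b2) ("id", v) = (b0, b1, b2) := by
          simp [pvStep, pvRankOf, hv]
        rw [List.foldl_cons, hstep, ih _ _ _ hrest]
        have e0 : C0 (("id", v)::rest) = C0 rest := by
          simp [C0, pvGetAttr, hn, sl, pvT, hv]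
        have e1 : C1 (("id", v)::rest) = C1 rest := by
          simp [C1, pvGetAttr]
        have e2 : C2 (("id", v)::rest) = C2 rest := by
          simp [C2, pvGetAttr]
        rw [e0, e1, e2]
      · have hstep : pvStep (b0, b1, b2) ("id", v) = (pvUpd b0 2 v, b1, b2) := by
          simp [pvStep, pvRankOf, hv]
        rw [List.foldl_cons, hstep, ih _ _ _ hrest]
        have hsl : sl 2 (some v) = some ((2 : Nat), v) := by simp [sl, pvT, hv]
        have ec : omin (pvUpd b0 2 v) (C0 rest) = omin b0 (C0 (("id", v)::rest)) := by
          rw [pvUpd_eq_omin, omin_assoc]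
          congr 1
          simp only [C0, pvGetAttr, hn, hsl, sl_none, omin_none_left, omin_none_right, String.reduceEq, reduceIte]
          rw [omin_some_left_comm 2 v 0 (pvGetAttr rest "locus_tag") _ (by decide)]
          congr 1
          exact omin_some_sl_comm 2 v 1 (pvGetAttr rest "ID") (by decide)
        have e1 : C1 (("id", v)::rest) = C1 rest := by
          simp [C1, pvGetAttr]
        have e2 : C2 (("id", v)::rest) = C2 rest := by
          simp [C2, pvGetAttr]
        rw [ec, e1, e2]
    by_cases hkey3 : k = "gene"
    · subst hkey3
      have hn : pvGetAttr rest "gene" = none := pvGetAttr_not_mem rest "gene" hk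
      by_cases hv : v = ""
      · have hstep : pvStep (b0, b1, b2) ("gene", v) = (b0, b1, b2) := by
          simp [pvStep, pvRankOf, hv]
        rw [List.foldl_cons, hstep, ih _ _ _ hrest]
        have e1 : C1 (("gene", v)::rest) = C1 rest := by
          simp [C1, pvGetAttr, hn, sl, pvT, hv]
        have e0 : C0 (("gene", v)::rest) = C0 rest := by
          simp [C0, pvGetAttr]
        have e2 : C2 (("gene", v)::rest) = C2 rest := by
          simp [C2, pvGetAttr]
        rw [e0, e1, e2]
      · have hstep : pvStep (b0, b1, b2) ("gene", v) = (b0, pvUpd b1 0 v, b2) := by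
          simp [pvStep, pvRankOf, hv]
        rw [List.foldl_cons, hstep, ih _ _ _ hrest]
        have hsl : sl 0 (some v) = some ((0 : Nat), v) := by simp [sl, pvT, hv]
        have ec : omin (pvUpd b1 0 v) (C1 rest) = omin b1 (C1 (("gene", v)::rest)) := by
          rw [pvUpd_eq_omin, omin_assoc]
          congr 1
          simp [C1, pvGetAttr, hn, hsl, sl_none, omin_none_left]
        have e0 : C0 (("gene", v)::rest) = C0 rest := by
          simp [C0, pvGetAttr]
        have e2 : C2 (("gene", v)::rest) = C2 rest := by
          simp [C2, pvGetAttr]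
        rw [ec, e0, e2]
    by_cases hkey4 : k = "Name"
    · subst hkey4
      have hn : pvGetAttr rest "Name" = none := pvGetAttr_not_mem rest "Name" hk
      by_cases hv : v = ""
      · have hstep : pvStep (b0, b1, b2) ("Name", v) = (b0, b1, b2) := by
          simp [pvStep, pvRankOf, hv]
        rw [List.foldl_cons, hstep, ih _ _ _ hrest]
        have e1 : C1 (("Name", v)::rest) = C1 rest := by
          simp [C1, pvGetAttr, hn, sl, pvT, hv]
        have e0 : C0 (("Name", v)::rest) = C0 rest := by
          simp [C0, pvGetAttr]
        have e2 : C2 (("Name", v)::rest) = C2 rest := by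
          simp [C2, pvGetAttr]
        rw [e0, e1, e2]
      · have hstep : pvStep (b0, b1, b2) ("Name", v) = (b0, pvUpd b1 1 v, b2) := by
          simp [pvStep, pvRankOf, hv]
        rw [List.foldl_cons, hstep, ih _ _ _ hrest]
        have hsl : sl 1 (some v) = some ((1 : Nat), v) := by simp [sl, pvT, hv]
        have ec : omin (pvUpd b1 1 v) (C1 rest) = omin b1 (C1 (("Name", v)::rest)) := by
          rw [pvUpd_eq_omin, omin_assoc]
          congr 1
          simp only [C1, pvGetAttr, hn, hsl, sl_none, omin_none_left, omin_none_right, String.reduceEq, reduceIte]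
          rw [omin_some_left_comm 1 v 0 (pvGetAttr rest "gene") _ (by decide)]
        have e0 : C0 (("Name", v)::rest) = C0 rest := by
          simp [C0, pvGetAttr]
        have e2 : C2 (("Name", v)::rest) = C2 rest := by
          simp [C2, pvGetAttr]
        rw [ec, e0, e2]
    by_cases hkey5 : k = "Gene"
    · subst hkey5
      have hn : pvGetAttr rest "Gene" = none := pvGetAttr_not_mem rest "Gene" hk
      by_cases hv : v = ""
      · have hstep : pvStep (b0, b1, b2) ("Gene", v) = (b0, b1, b2) := by
          simp [pvStep, pvRankOf, hv]
        rw [List.foldl_cons, hstep, ih _ _ _ hrest]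
        have e1 : C1 (("Gene", v)::rest) = C1 rest := by
          simp [C1, pvGetAttr, hn, sl, pvT, hv]
        have e0 : C0 (("Gene", v)::rest) = C0 rest := by
          simp [C0, pvGetAttr]
        have e2 : C2 (("Gene", v)::rest) = C2 rest := by
          simp [C2, pvGetAttr]
        rw [e0, e1, e2]
      · have hstep : pvStep (b0, b1, b2) ("Gene", v) = (b0, pvUpd b1 2 v, b2) := by
          simp [pvStep, pvRankOf, hv]
        rw [List.foldl_cons, hstep, ih _ _ _ hrest]
        have hsl : sl 2 (some v) = some ((2 : Nat), v) := by simp [sl, pvT, hv]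
        have ec : omin (pvUpd b1 2 v) (C1 rest) = omin b1 (C1 (("Gene", v)::rest)) := by
          rw [pvUpd_eq_omin, omin_assoc]
          congr 1
          simp only [C1, pvGetAttr, hn, hsl, sl_none, omin_none_left, omin_none_right, String.reduceEq, reduceIte]
          rw [omin_some_left_comm 2 v 0 (pvGetAttr rest "gene") _ (by decide)]
          congr 1
          rw [omin_some_left_comm 2 v 1 (pvGetAttr rest "Name") _ (by decide)]
        have e0 : C0 (("Gene", v)::rest) = C0 rest := by
          simp [C0, pvGetAttr]
        have e2 : C2 (("Gene", v)::rest) = C2 rest := by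
          simp [C2, pvGetAttr]
        rw [ec, e0, e2]
    by_cases hkey6 : k = "name"
    · subst hkey6
      have hn : pvGetAttr rest "name" = none := pvGetAttr_not_mem rest "name" hk
      by_cases hv : v = ""
      · have hstep : pvStep (b0, b1, b2) ("name", v) = (b0, b1, b2) := by
          simp [pvStep, pvRankOf, hv]
        rw [List.foldl_cons, hstep, ih _ _ _ hrest]
        have e1 : C1 (("name", v)::rest) = C1 rest := by
          simp [C1, pvGetAttr, hn, sl, pvT, hv]
        have e0 : C0 (("name", v)::rest) = C0 rest := by
          simp [C0, pvGetAttr]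
        have e2 : C2 (("name", v)::rest) = C2 rest := by
          simp [C2, pvGetAttr]
        rw [e0, e1, e2]
      · have hstep : pvStep (b0, b1, b2) ("name", v) = (b0, pvUpd b1 3 v, b2) := by
          simp [pvStep, pvRankOf, hv]
        rw [List.foldl_cons, hstep, ih _ _ _ hrest]
        have hsl : sl 3 (some v) = some ((3 : Nat), v) := by simp [sl, pvT, hv]
        have ec : omin (pvUpd b1 3 v) (C1 rest) = omin b1 (C1 (("name", v)::rest)) := by
          rw [pvUpd_eq_omin, omin_assoc]
          congr 1
          simp only [C1, pvGetAttr, hn, hsl, sl_none, omin_none_left, omin_none_right, String.reduceEq, reduceIte]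
          rw [omin_some_left_comm 3 v 0 (pvGetAttr rest "gene") _ (by decide)]
          congr 1
          rw [omin_some_left_comm 3 v 1 (pvGetAttr rest "Name") _ (by decide)]
          congr 1
          exact omin_some_sl_comm 3 v 2 (pvGetAttr rest "Gene") (by decide)
        have e0 : C0 (("name", v)::rest) = C0 rest := by
          simp [C0, pvGetAttr]
        have e2 : C2 (("name", v)::rest) = C2 rest := by
          simp [C2, pvGetAttr]
        rw [ec, e0, e2]
    by_cases hkey7 : k = "product"
    · subst hkey7
      have hn : pvGetAttr rest "product" = none := pvGetAttr_not_mem rest "product" hk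
      by_cases hv : v = ""
      · have hstep : pvStep (b0, b1, b2) ("product", v) = (b0, b1, b2) := by
          simp [pvStep, pvRankOf, hv]
        rw [List.foldl_cons, hstep, ih _ _ _ hrest]
        have e2 : C2 (("product", v)::rest) = C2 rest := by
          simp [C2, pvGetAttr, hn, sl, pvT, hv]
        have e0 : C0 (("product", v)::rest) = C0 rest := by
          simp [C0, pvGetAttr]
        have e1 : C1 (("product", v)::rest) = C1 rest := by
          simp [C1, pvGetAttr]
        rw [e0, e1, e2]
      · have hstep : pvStep (b0, b1, b2) ("product", v) = (b0, b1, pvUpd b2 0 v) := by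
          simp [pvStep, pvRankOf, hv]
        rw [List.foldl_cons, hstep, ih _ _ _ hrest]
        have hsl : sl 0 (some v) = some ((0 : Nat), v) := by simp [sl, pvT, hv]
        have ec : omin (pvUpd b2 0 v) (C2 rest) = omin b2 (C2 (("product", v)::rest)) := by
          rw [pvUpd_eq_omin, omin_assoc]
          congr 1
          simp [C2, pvGetAttr, hn, hsl, sl_none, omin_none_left]
        have e0 : C0 (("product", v)::rest) = C0 rest := by
          simp [C0, pvGetAttr]
        have e1 : C1 (("product", v)::rest) = C1 rest := by
          simp [C1, pvGetAttr]
        rw [ec, e0, e1]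
    by_cases hkey8 : k = "description"
    · subst hkey8
      have hn : pvGetAttr rest "description" = none := pvGetAttr_not_mem rest "description" hk
      by_cases hv : v = ""
      · have hstep : pvStep (b0, b1, b2) ("description", v) = (b0, b1, b2) := by
          simp [pvStep, pvRankOf, hv]
        rw [List.foldl_cons, hstep, ih _ _ _ hrest]
        have e2 : C2 (("description", v)::rest) = C2 rest := by
          simp [C2, pvGetAttr, hn, sl, pvT, hv]
        have e0 : C0 (("description", v)::rest) = C0 rest := by
          simp [C0, pvGetAttr]
        have e1 : C1 (("description", v)::rest) = C1 rest := by
          simp [C1, pvGetAttr]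
        rw [e0, e1, e2]
      · have hstep : pvStep (b0, b1, b2) ("description", v) = (b0, b1, pvUpd b2 1 v) := by
          simp [pvStep, pvRankOf, hv]
        rw [List.foldl_cons, hstep, ih _ _ _ hrest]
        have hsl : sl 1 (some v) = some ((1 : Nat), v) := by simp [sl, pvT, hv]
        have ec : omin (pvUpd b2 1 v) (C2 rest) = omin b2 (C2 (("description", v)::rest)) := by
          rw [pvUpd_eq_omin, omin_assoc]
          congr 1
          simp only [C2, pvGetAttr, hn, hsl, sl_none, omin_none_left, omin_none_right, String.reduceEq, reduceIte]
          rw [omin_some_left_comm 1 v 0 (pvGetAttr rest "product") _ (by decide)]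
        have e0 : C0 (("description", v)::rest) = C0 rest := by
          simp [C0, pvGetAttr]
        have e1 : C1 (("description", v)::rest) = C1 rest := by
          simp [C1, pvGetAttr]
        rw [ec, e0, e1]
    by_cases hkey9 : k = "note"
    · subst hkey9
      have hn : pvGetAttr rest "note" = none := pvGetAttr_not_mem rest "note" hk
      by_cases hv : v = ""
      · have hstep : pvStep (b0, b1, b2) ("note", v) = (b0, b1, b2) := by
          simp [pvStep, pvRankOf, hv]
        rw [List.foldl_cons, hstep, ih _ _ _ hrest]
        have e2 : C2 (("note", v)::rest) = C2 rest := by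
          simp [C2, pvGetAttr, hn, sl, pvT, hv]
        have e0 : C0 (("note", v)::rest) = C0 rest := by
          simp [C0, pvGetAttr]
        have e1 : C1 (("note", v)::rest) = C1 rest := by
          simp [C1, pvGetAttr]
        rw [e0, e1, e2]
      · have hstep : pvStep (b0, b1, b2) ("note", v) = (b0, b1, pvUpd b2 2 v) := by
          simp [pvStep, pvRankOf, hv]
        rw [List.foldl_cons, hstep, ih _ _ _ hrest]
        have hsl : sl 2 (some v) = some ((2 : Nat), v) := by simp [sl, pvT, hv]
        have ec : omin (pvUpd b2 2 v) (C2 rest) = omin b2 (C2 (("note", v)::rest)) := by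
          rw [pvUpd_eq_omin, omin_assoc]
          congr 1
          simp only [C2, pvGetAttr, hn, hsl, sl_none, omin_none_left, omin_none_right, String.reduceEq, reduceIte]
          rw [omin_some_left_comm 2 v 0 (pvGetAttr rest "product") _ (by decide)]
          congr 1
          exact omin_some_sl_comm 2 v 1 (pvGetAttr rest "description") (by decide)
        have e0 : C0 (("note", v)::rest) = C0 rest := by
          simp [C0, pvGetAttr]
        have e1 : C1 (("note", v)::rest) = C1 rest := by
          simp [C1, pvGetAttr]
        rw [ec, e0, e1]
    have hrank : pvRankOf k = none := by
      simp [pvRankOf, hkey0, hkey1, hkey2, hkey3, hkey4, hkey5, hkey6, hkey7, hkey8, hkey9]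
    have hstep : pvStep (b0, b1, b2) (k, v) = (b0, b1, b2) := by simp [pvStep, hrank]
    rw [List.foldl_cons, hstep, ih _ _ _ hrest]
    have e0 : C0 ((k, v)::rest) = C0 rest := by simp [C0, pvGetAttr, hkey0, hkey1, hkey2, hkey3, hkey4, hkey5, hkey6, hkey7, hkey8, hkey9]
    have e1 : C1 ((k, v)::rest) = C1 rest := by simp [C1, pvGetAttr, hkey0, hkey1, hkey2, hkey3, hkey4, hkey5, hkey6, hkey7, hkey8, hkey9]
    have e2 : C2 ((k, v)::rest) = C2 rest := by simp [C2, pvGetAttr, hkey0, hkey1, hkey2, hkey3, hkey4, hkey5, hkey6, hkey7, hkey8, hkey9]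
    rw [e0, e1, e2]

theorem matchT0 (lab : String) (o : Option String) :
    (match o with
     | some s => if s = "" then ([] : List String) else [lab ++ s]
     | none => ([] : List String))
    = (match pvT o with | some s => [lab ++ s] | none => []) := by
  cases o with
  | none => simp [pvT]
  | some s => by_cases h : s = "" <;> simp [pvT, h]

theorem matchT (hl : List String) (lab : String) (o : Option String) :
    (match o with
     | some s => if s = "" then hl else hl ++ [lab ++ s]
     | none => hl)
    = hl ++ (match pvT o with | some s => [lab ++ s] | none => []) := by
  cases o with
  | none => simp [pvT]
  | some s => by_cases h : s = "" <;> simp [pvT, h]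

-- zip-cell line from a rank-min chain = Python-or chain line (3 keys)
theorem optLine_C3 (lab : String) (a b c : Option String) :
    pvOptLine lab (omin (sl 0 a) (omin (sl 1 b) (sl 2 c)))
      = (match (pvT a).or ((pvT b).or (pvT c)) with
          | some s => [lab ++ s]
          | none => []) := by
  rcases ha : pvT a with _ | x <;> rcases hb : pvT b with _ | y <;> rcases hc : pvT c with _ | z <;>
    simp [sl, ha, hb, hc, omin, pvOptLine, Option.or]

theorem optLine_C4 (lab : String) (a b c d : Option String) :
    pvOptLine lab (omin (sl 0 a) (omin (sl 1 b) (omin (sl 2 c) (sl 3 d))))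
      = (match (pvT a).or ((pvT b).or ((pvT c).or (pvT d))) with
          | some s => [lab ++ s]
          | none => []) := by
  rcases ha : pvT a with _ | x <;> rcases hb : pvT b with _ | y <;> rcases hc : pvT c with _ | z <;>
    rcases hd : pvT d with _ | w <;> simp [sl, ha, hb, hc, hd, omin, pvOptLine, Option.or]

-- ===== VERDICT (by name: the statement is the Claim_ definition above) =====
set_option maxHeartbeats 1000000 in
theorem attr_hover_text_spec : Claim_equal_attr_hover_text := by
  intro l ff _ hpre
  unfold Spec_attr_hover_text attr_hover_text attr_hover_text_alt
  rw [foldl_pvStep_eq l none none none hpre]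
  simp only [omin_none_left, C0, C1, C2, optLine_C3, optLine_C4, matchT, matchT0, pvT_pyOr,
    Option.or_assoc, List.nil_append]
  generalize (pvT (pvGetAttr l "locus_tag")).or ((pvT (pvGetAttr l "ID")).or (pvT (pvGetAttr l "id"))) = o0
  generalize (pvT (pvGetAttr l "gene")).or ((pvT (pvGetAttr l "Name")).or ((pvT (pvGetAttr l "Gene")).or (pvT (pvGetAttr l "name")))) = o1
  generalize (pvT (pvGetAttr l "product")).or ((pvT (pvGetAttr l "description")).or (pvT (pvGetAttr l "note"))) = o2
  rcases o0 with _ | s0 <;> rcases o1 with _ | s1 <;> rcases o2 with _ | s2 <;>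
    by_cases hl0 : l = [] <;>
    by_cases hu1 : PySem.Str.upper ff = "GFF3" <;>
    by_cases hu2 : PySem.Str.upper ff = "GTF" <;>
    simp [hl0, hu1, hu2, List.map_eq_nil_iff]
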